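-- pv_equiv track=rewrite | github.com/rohaniyerr/Cribbage | final_partA.py | evaluate
-- ===== SOURCE A (Python) =====
-- rank_order = {
--    'A': 1, '2': 2, '3': 3, '4': 4,
--    '5': 5, '6': 6, '7': 7, '8': 8,
--    '9': 9, '10': 10, 'J': 11, 'Q': 12, 'K': 13
-- }
--
-- rank_count = {
--    'A': 1, '2': 2, '3': 3, '4': 4,
--    '5': 5, '6': 6, '7': 7, '8': 8,
--    '9': 9, '10': 10, 'J': 10, 'Q': 10, 'K': 10
-- }
--
-- def same_ranks(ranks):
--     """Return True if the cards in a list of ranks are all of the same rank."""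
--     if ranks == []:
--         return True
--     rank = ranks[0]
--     for elt in ranks:
--         if elt != rank:
--             return False
--     return True
--
-- def is_straight(ranks):
--     """Return `True` if the card ranks form a linear sequence.
--
--     A linear sequence means a sequence of consecutive card ranks
--     with no gaps.  The rank sequence is: A, 2, 3, ... 10, J, Q, K.
--     The order of the cards is unimportant.
--     """
--     sorted_ranks = []
--     if ranks == []:
--         return True
--     for card in ranks:
--         if card in rank_order:
--             sorted_ranks.append(rank_order[card])
--     sorted_ranks.sort()
--     first_card = sorted_ranks[0]
--     for elt in sorted_ranks[1::]:
--         if elt != first_card + 1: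
--             return False
--         else:
--             first_card = elt
--     return True
--
-- def evaluate(stack):
--     """Return the number of points gained from the last card in the stack.
--
--     Arguments:
--     - stack: a list of card ranks
--
--     Return value: a 2-tuple of
--     - the points gained from the last card in the stack
--     - a list of tags of the cribbage point types from the last card
--       in the stack.
--     """
--     points = 0
--     combo = []
--     # Check if 'j' is the first element
--     if stack[0] == 'J' and len(stack) == 1:
--         combo.append('j')
--         points += 2
--     # Check if count gets to 15 or 31
--     sorted_ranks = []
--     for card in stack:
--         if card in rank_count:
--             sorted_ranks.append(rank_count[card])
--     if sum(sorted_ranks) == 15: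
--         combo.append('c15')
--         points += 2
--     elif sum(sorted_ranks) == 31:
--         combo.append('c31')
--         points += 2
--     # Check if the stack has a straight
--     if len(stack) in range(3, 8):
--         for num in range(7, 2, -1):
--             if is_straight(stack[-num:]) and len(stack) >= num:
--                 combo.append('s{n}'.format(n=num))
--                 points += num
--                 break
--     # Check if the stack has a pair
--     if same_ranks(stack[-4:]) and len(stack) > 3:
--         combo.append('k4')
--         points += 12
--     elif same_ranks(stack[-3:]) and len(stack) > 2:
--         combo.append('k3')
--         points += 6
--     elif same_ranks(stack[-2:]) and len(stack) > 1:
--         combo.append('k2')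
--         points += 2
--     return (points, combo)
-- ===== SOURCE B (Python) =====
-- rank_order = {
--    'A': 1, '2': 2, '3': 3, '4': 4,
--    '5': 5, '6': 6, '7': 7, '8': 8,
--    '9': 9, '10': 10, 'J': 11, 'Q': 12, 'K': 13
-- }
--
-- rank_count = {
--    'A': 1, '2': 2, '3': 3, '4': 4,
--    '5': 5, '6': 6, '7': 7, '8': 8,
--    '9': 9, '10': 10, 'J': 10, 'Q': 10, 'K': 10
-- }
--
-- def evaluate(stack):
--     """Return the number of points gained from the last card in the stack."""
--     points = 0
--     combo = []
--     # his heels: single jack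
--     if len(stack) == 1 and stack[0] == 'J':
--         combo.append('j')
--         points += 2
--     # count to 15 / 31 (non-rank tokens count 0)
--     total = sum(rank_count.get(c, 0) for c in stack)
--     if total == 15:
--         combo.append('c15')
--         points += 2
--     elif total == 31:
--         combo.append('c31')
--         points += 2
--     # longest straight among trailing windows (non-rank tokens filtered out):
--     # distinct values spanning exactly their count form a run
--     if 3 <= len(stack) <= 7:
--         for L in range(min(len(stack), 7), 2, -1):
--             vals = [rank_order[c] for c in stack[-L:] if c in rank_order]
--             if vals and len(set(vals)) == len(vals) and max(vals) - min(vals) == len(vals) - 1: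
--                 combo.append('s%d' % L)
--                 points += L
--                 break
--     # pairs: length of the trailing run of identical tokens
--     run = 0
--     if stack:
--         last = stack[-1]
--         for c in reversed(stack):
--             if c != last:
--                 break
--             run += 1
--     if run >= 4:
--         combo.append('k4')
--         points += 12
--     elif run >= 3:
--         combo.append('k3')
--         points += 6
--     elif run >= 2:
--         combo.append('k2')
--         points += 2
--     return (points, combo)
-- ===== Notes on version B (the rewrite author's own statement) =====
-- stated objective: alternative
-- what changed: The three cascading same_ranks window tests become one backward trailing-run count scored by thresholds, the sort-and-scan straight test becomes a distinct-values span check (len(set)==len and max-min==len-1) over trailing windows from min(len,7) down, and the 15/31 count is a direct sum with default 0 instead of filter-then-sum.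
import Mathlib
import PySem

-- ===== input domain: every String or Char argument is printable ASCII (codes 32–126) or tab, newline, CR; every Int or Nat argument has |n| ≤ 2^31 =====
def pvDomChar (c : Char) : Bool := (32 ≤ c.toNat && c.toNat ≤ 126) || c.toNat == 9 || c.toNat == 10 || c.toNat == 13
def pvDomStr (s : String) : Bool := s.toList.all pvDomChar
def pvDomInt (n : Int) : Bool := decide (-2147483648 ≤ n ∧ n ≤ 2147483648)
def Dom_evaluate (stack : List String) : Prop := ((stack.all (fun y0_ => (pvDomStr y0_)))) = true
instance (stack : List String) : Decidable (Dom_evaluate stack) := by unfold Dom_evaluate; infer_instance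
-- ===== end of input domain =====

-- B replaces the cascading same-rank window tests by one trailing-run count, the sort-based
-- straight test by a distinct-values span check, and the filtered count by a defaulted sum.

-- ===== PORT A =====

-- 'card in rank_order' + 'rank_order[card]' as one Option-valued lookup
def rankOrder? (c : String) : Option Int :=
  match c with
  | "A" => some 1 | "2" => some 2 | "3" => some 3 | "4" => some 4
  | "5" => some 5 | "6" => some 6 | "7" => some 7 | "8" => some 8
  | "9" => some 9 | "10" => some 10 | "J" => some 11 | "Q" => some 12
  | "K" => some 13 | _ => none

def rankCount? (c : String) : Option Int :=
  match c with
  | "A" => some 1 | "2" => some 2 | "3" => some 3 | "4" => some 4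
  | "5" => some 5 | "6" => some 6 | "7" => some 7 | "8" => some 8
  | "9" => some 9 | "10" => some 10 | "J" => some 10 | "Q" => some 10
  | "K" => some 10 | _ => none

def sameRanksA (ranks : List String) : Bool :=
  match ranks with
  | [] => true
  | r :: _ => ranks.all (fun elt => elt == r)

-- the scan 'for elt in sorted_ranks[1::]' with accumulator first_card
def chainA : Int → List Int → Bool
  | _, [] => true
  | f, e :: t => if e ≠ f + 1 then false else chainA e t

def isStraightA (ranks : List String) : Bool :=
  if ranks = [] then true
  else
    match PySem.List.sorted (ranks.filterMap rankOrder?) (fun x => x) false with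
    | [] => false   -- Python raises IndexError (sorted_ranks[0]) here; excluded by Pre_evaluate
    | f :: t => chainA f t

-- 'for num in range(7, 2, -1): … break' as a first-hit search over [7,6,5,4,3]
def straightLoopA (stack : List String) : List Int → Option Int
  | [] => none
  | num :: rest =>
      if isStraightA (PySem.List.slice stack (some (-num)) none) && decide ((stack.length : Int) ≥ num)
      then some num else straightLoopA stack rest

def evaluate (stack : List String) : Int × List String :=
  -- stack[0]: Python raises IndexError on []; excluded by Pre_evaluate
  let (points, combo) : Int × List String :=
    if (PySem.List.pyGet? stack 0 == some "J") && (stack.length == 1)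
    then (2, ["j"]) else (0, [])
  let (points, combo) :=
    if (stack.filterMap rankCount?).sum = 15 then (points + 2, combo ++ ["c15"])
    else if (stack.filterMap rankCount?).sum = 31 then (points + 2, combo ++ ["c31"])
    else (points, combo)
  let (points, combo) :=
    if 3 ≤ stack.length ∧ stack.length < 8 then
      match straightLoopA stack [7, 6, 5, 4, 3] with
      | some num => (points + num, combo ++ ["s" ++ PySem.Int.toStr num])
      | none => (points, combo)
    else (points, combo)
  let (points, combo) :=
    if sameRanksA (PySem.List.slice stack (some (-4)) none) && decide (stack.length > 3)
    then (points + 12, combo ++ ["k4"])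
    else if sameRanksA (PySem.List.slice stack (some (-3)) none) && decide (stack.length > 2)
    then (points + 6, combo ++ ["k3"])
    else if sameRanksA (PySem.List.slice stack (some (-2)) none) && decide (stack.length > 1)
    then (points + 2, combo ++ ["k2"])
    else (points, combo)
  (points, combo)

-- ===== PORT B =====

-- 'vals and len(set(vals)) == len(vals) and max(vals) - min(vals) == len(vals) - 1'
def isStraightB (vals : List Int) : Bool :=
  !decide (vals = []) &&
  ((PySem.Set.ofList vals).length == vals.length) &&
  (match PySem.List.max? vals (fun x => x), PySem.List.min? vals (fun x => x) with
   | some mx, some mn => mx - mn == (vals.length : Int) - 1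
   | _, _ => false)

-- 'for L in range(min(len(stack), 7), 2, -1): … break'
def straightLoopB (stack : List String) : List Int → Option Int
  | [] => none
  | L :: rest =>
      if isStraightB ((PySem.List.slice stack (some (-L)) none).filterMap rankOrder?)
      then some L else straightLoopB stack rest

-- trailing run of tokens equal to the last one ('for c in reversed(stack): …')
def trailRun (stack : List String) : Nat :=
  match stack.reverse with
  | [] => 0
  | last :: _ => ((stack.reverse).takeWhile (fun c => c == last)).length

def evaluate_alt (stack : List String) : Int × List String :=
  let (points, combo) : Int × List String :=
    if (stack.length == 1) && (PySem.List.pyGet? stack 0 == some "J")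
    then (2, ["j"]) else (0, [])
  let (points, combo) :=
    if (stack.map (fun c => (rankCount? c).getD 0)).sum = 15 then (points + 2, combo ++ ["c15"])
    else if (stack.map (fun c => (rankCount? c).getD 0)).sum = 31 then (points + 2, combo ++ ["c31"])
    else (points, combo)
  let (points, combo) :=
    if 3 ≤ stack.length ∧ stack.length ≤ 7 then
      match straightLoopB stack (PySem.List.pyRange (min (stack.length : Int) 7) 2 (-1)) with
      | some L => (points + L, combo ++ ["s" ++ PySem.Int.toStr L])
      | none => (points, combo)
    else (points, combo)
  let (points, combo) :=
    if 4 ≤ trailRun stack then (points + 12, combo ++ ["k4"])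
    else if 3 ≤ trailRun stack then (points + 6, combo ++ ["k3"])
    else if 2 ≤ trailRun stack then (points + 2, combo ++ ["k2"])
    else (points, combo)
  (points, combo)

-- ===== PRECONDITION & SPEC =====

-- Pre_ excludes exactly the inputs on which Python A raises IndexError: the empty stack
-- (stack[0]) and stacks of length 3..7 with no rank token (sorted_ranks[0] in is_straight).
def Pre_evaluate (stack : List String) : Prop :=
  stack ≠ [] ∧
  (3 ≤ stack.length ∧ stack.length ≤ 7 →
    ∃ c ∈ stack, c ∈ (["A","2","3","4","5","6","7","8","9","10","J","Q","K"] : List String))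
instance (stack : List String) : Decidable (Pre_evaluate stack) := by unfold Pre_evaluate; infer_instance

def pvWitness_evaluate : List String := ["5", "J", "Q", "K"]

def Spec_evaluate (stack : List String) (out : Int × List String) : Prop := out = evaluate_alt stack
instance (stack : List String) (out : Int × List String) : Decidable (Spec_evaluate stack out) := by unfold Spec_evaluate; infer_instance

-- ===== CLAIM (what is proved, stated in full; the proofs are below) =====
def Claim_equal_evaluate : Prop := ∀ (stack : List String), Dom_evaluate stack → Pre_evaluate stack → Spec_evaluate stack (evaluate stack)

-- ===== LEMMAS AND PROOFS =====

lemma bool_ext {a b : Bool} (h : a = true ↔ b = true) : a = b := by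
  cases a <;> cases b <;> simp_all

-- the filtered-then-summed count equals the defaulted sum
lemma sum_filterMap_getD (f : String → Option Int) (l : List String) :
    (l.filterMap f).sum = (l.map (fun c => (f c).getD 0)).sum := by
  induction l with
  | nil => rfl
  | cons a t ih => cases h : f a <;> simp [h, ih]

lemma toFinset_card_lt_of_not_nodup (l : List Int) (h : ¬ l.Nodup) :
    l.toFinset.card < l.length := by
  induction l with
  | nil => simp at h
  | cons a t ih =>
    by_cases ht : t.Nodup
    · have ha : a ∈ t := by
        by_contra hna
        exact h (List.nodup_cons.mpr ⟨hna, ht⟩)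
      have : (a :: t).toFinset = t.toFinset := by
        simp [List.toFinset_cons, List.mem_toFinset, ha]
      rw [this]
      have := List.toFinset_card_le t
      simp only [List.length_cons]
      omega
    · have h1 := ih ht
      have h2 : (a :: t).toFinset.card ≤ t.toFinset.card + 1 := by
        simp only [List.toFinset_cons]
        exact Finset.card_insert_le _ _
      simp only [List.length_cons]
      omega

lemma ofList_toFinset (l : List Int) : (PySem.Set.ofList l).toFinset = l.toFinset := by
  ext x
  simp [List.mem_toFinset, PySem.Set.mem_ofList]

lemma nodup_of_ofList_length (l : List Int) (h : (PySem.Set.ofList l).length = l.length) :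
    l.Nodup := by
  by_contra hn
  have h1 : (PySem.Set.ofList l).toFinset.card = (PySem.Set.ofList l).length :=
    List.toFinset_card_of_nodup (PySem.Set.nodup_ofList l)
  rw [ofList_toFinset] at h1
  have h2 := toFinset_card_lt_of_not_nodup l hn
  omega

-- the sorted scan accepts exactly the consecutive run starting at its head
lemma chainA_iff (t : List Int) : ∀ f : Int,
    (chainA f t = true ↔ f :: t = PySem.List.pyRange f (f + ((t.length : Int) + 1)) 1) := by
  induction t with
  | nil =>
    intro f
    simp only [List.length_nil, Nat.cast_zero, zero_add]
    rw [PySem.List.pyRange_one_singleton]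
    simp [chainA]
  | cons e t ih =>
    intro f
    have hb : f < f + ((((e :: t).length : Nat) : Int) + 1) := by
      simp only [List.length_cons]; push_cast; omega
    rw [show (chainA f (e :: t)) = (if e ≠ f + 1 then false else chainA e t) from rfl]
    rw [PySem.List.pyRange_one_cons hb]
    by_cases he : e = f + 1
    · rw [if_neg (by simp [he])]
      rw [ih e]
      have he' : f + 1 = e := he.symm
      have harith : f + ((((e :: t).length : Nat) : Int) + 1) = e + ((t.length : Int) + 1) := by
        simp only [List.length_cons]; push_cast; omega
      rw [harith, he']
      simp [List.cons.injEq]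
    · rw [if_pos he]
      have hb2 : f + 1 < f + ((((e :: t).length : Nat) : Int) + 1) := by
        simp only [List.length_cons]; push_cast; omega
      rw [PySem.List.pyRange_one_cons hb2]
      simp [List.cons.injEq, he]

-- the two straight tests agree on every nonempty window
lemma isStraight_eq (ranks : List String) (hne : ranks ≠ []) :
    isStraightA ranks = isStraightB (ranks.filterMap rankOrder?) := by
  unfold isStraightA isStraightB
  rw [if_neg hne]
  by_cases hvals : ranks.filterMap rankOrder? = []
  · rw [hvals]
    have hs0 : PySem.List.sorted ([] : List Int) (fun x => x) false = [] :=
      (PySem.List.sorted_perm [] (fun x => x) false).eq_nil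
    simp [hs0]
  · cases h : PySem.List.sorted (ranks.filterMap rankOrder?) (fun x => x) false with
    | nil =>
      have hp := PySem.List.sorted_perm (ranks.filterMap rankOrder?) (fun x => x) false
      rw [h] at hp
      exact absurd hp.symm.eq_nil hvals
    | cons f t =>
      set vals := ranks.filterMap rankOrder? with hv
      have hsp : (f :: t).Perm vals := by
        rw [← h]; exact PySem.List.sorted_perm vals (fun x => x) false
      have hlen : t.length + 1 = vals.length := by
        have hls := PySem.List.length_sorted vals (fun x : Int => x) false
        rw [h] at hls
        simpa using hls
      cases hmx : PySem.List.max? vals (fun x => x) with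
      | none =>
        rw [PySem.List.max?_eq_none_iff] at hmx
        exact absurd hmx hvals
      | some mx =>
      cases hmn : PySem.List.min? vals (fun x => x) with
      | none =>
        rw [PySem.List.min?_eq_none_iff] at hmn
        exact absurd hmn hvals
      | some mn =>
      apply bool_ext
      simp only [Bool.and_eq_true, Bool.not_eq_true', beq_iff_eq, decide_eq_false_iff_not]
      constructor
      · -- A ⇒ B
        intro hc
        have hrange := (chainA_iff t f).mp hc
        have hnd : vals.Nodup := by
          refine hsp.nodup ?_
          rw [hrange]
          exact PySem.List.nodup_pyRange_one _ _
        have hmem : ∀ x, x ∈ vals ↔ (f ≤ x ∧ x < f + ((t.length : Int) + 1)) := by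
          intro x
          rw [← hsp.mem_iff, hrange, PySem.List.mem_pyRange_one]
        refine ⟨⟨hvals, by rw [PySem.Set.ofList_eq_self_of_nodup vals hnd]⟩, ?_⟩
        have htop : f + (t.length : Int) ∈ vals := by
          rw [hmem]; omega
        have hbot : f ∈ vals := by rw [hmem]; omega
        have hmx1 := PySem.List.max?_isMax hmx
        have hmx2 := PySem.List.max?_mem hmx
        have hmn1 := PySem.List.min?_isMin hmn
        have hmn2 := PySem.List.min?_mem hmn
        have e1 : mx = f + (t.length : Int) := by
          have h1 := hmx1 _ htop
          have h2 := (hmem mx).mp hmx2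
          simp only at h1
          omega
        have e2 : mn = f := by
          have h1 := hmn1 _ hbot
          have h2 := (hmem mn).mp hmn2
          simp only at h1
          omega
        rw [e1, e2, ← hlen]
        push_cast
        ring
      · -- B ⇒ A
        rintro ⟨⟨-, hofl⟩, hspan⟩
        have hnd : vals.Nodup := nodup_of_ofList_length vals hofl
        have hpos : 0 < vals.length := List.length_pos_of_ne_nil hvals
        have hsub : vals ⊆ PySem.List.pyRange mn (mn + (vals.length : Int)) 1 := by
          intro x hx
          rw [PySem.List.mem_pyRange_one]
          have h1 := PySem.List.min?_isMin hmn _ hx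
          have h2 := PySem.List.max?_isMax hmx _ hx
          simp only at h1 h2
          omega
        have hlr : (PySem.List.pyRange mn (mn + (vals.length : Int)) 1).length = vals.length := by
          rw [PySem.List.length_pyRange_one]
          simp
        have hperm : vals.Perm (PySem.List.pyRange mn (mn + (vals.length : Int)) 1) :=
          (List.subperm_of_subset hnd hsub).perm_of_length_le (by omega)
        have hsorted := PySem.List.sorted_eq_of_perm_of_pairwise_lt vals
          (PySem.List.pyRange mn (mn + (vals.length : Int)) 1) (fun x => x)
          hperm.symm (PySem.List.pairwise_lt_pyRange_one _ _)
        rw [h] at hsorted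
        have hbp : mn < mn + (vals.length : Int) := by omega
        rw [PySem.List.pyRange_one_cons hbp] at hsorted
        have hf : f = mn := ((List.cons.injEq _ _ _ _).mp hsorted).1
        apply (chainA_iff t f).mpr
        have harith : f + ((t.length : Int) + 1) = mn + (vals.length : Int) := by
          rw [hf, ← hlen]; push_cast; ring
        have hbp2 : f < mn + (vals.length : Int) := by rw [hf]; exact hbp
        rw [harith, PySem.List.pyRange_one_cons hbp2]
        rw [hf] at hsorted ⊢
        exact hsorted

-- each window test of A equals B's on windows that fit in the stack
lemma stepEq (stack : List String) (num : Int) (h3 : 3 ≤ num) (hle : num ≤ (stack.length : Int)) :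
    isStraightA (PySem.List.slice stack (some (-num)) none)
      = isStraightB ((PySem.List.slice stack (some (-num)) none).filterMap rankOrder?) := by
  apply isStraight_eq
  have hnn : ((num.toNat : Nat) : Int) = num := Int.toNat_of_nonneg (by omega)
  rw [show (some (-num) : Option Int) = some (-((num.toNat : Nat) : Int)) from by rw [hnn]]
  rw [PySem.List.slice_from_neg_natCast stack num.toNat (by omega)]
  rw [Ne, List.drop_eq_nil_iff]
  omega

-- A's loop over [7..3] with the length guard is B's loop over the fitting windows
lemma loops_eq (stack : List String) : ∀ nums : List Int, (∀ num ∈ nums, 3 ≤ num) →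
    straightLoopA stack nums
      = straightLoopB stack (nums.filter (fun num => decide (num ≤ (stack.length : Int)))) := by
  intro nums
  induction nums with
  | nil => intro _; rfl
  | cons num rest ih =>
    intro hall
    have h3 : 3 ≤ num := hall num (by simp)
    have hrest : ∀ n ∈ rest, 3 ≤ n := fun n hn => hall n (List.mem_cons_of_mem _ hn)
    by_cases hle : num ≤ (stack.length : Int)
    · rw [List.filter_cons_of_pos (by simpa using hle)]
      simp only [straightLoopA, straightLoopB]
      rw [stepEq stack num h3 hle,
          show (decide ((stack.length : Int) ≥ num)) = true from decide_eq_true hle,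
          Bool.and_true, ih hrest]
    · rw [List.filter_cons_of_neg (by simpa using hle)]
      simp only [straightLoopA]
      rw [show (decide ((stack.length : Int) ≥ num)) = false from decide_eq_false hle,
          Bool.and_false]
      simpa using ih hrest

lemma loops_concrete (stack : List String) :
    straightLoopA stack [7, 6, 5, 4, 3]
      = straightLoopB stack (PySem.List.pyRange (min (stack.length : Int) 7) 2 (-1)) := by
  rw [loops_eq stack [7, 6, 5, 4, 3] (by intro num h; fin_cases h <;> norm_num)]
  congr 1
  by_cases h7 : stack.length ≤ 7
  · obtain ⟨n, hn⟩ : ∃ n, stack.length = n := ⟨_, rfl⟩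
    rw [hn] at h7 ⊢
    interval_cases n <;> decide
  · have h7' : 7 < stack.length := by omega
    have hmin : min ((stack.length : Nat) : Int) 7 = 7 := by omega
    rw [hmin]
    rw [List.filter_eq_self.mpr (by intro a ha; fin_cases ha <;> simp <;> omega)]
    decide

lemma sameRanksA_iff (l : List String) : sameRanksA l = true ↔ ∀ x ∈ l, ∀ y ∈ l, x = y := by
  cases l with
  | nil => simp [sameRanksA]
  | cons r t =>
    simp only [sameRanksA, List.all_eq_true, beq_iff_eq]
    constructor
    · intro h x hx y hy
      rw [h x hx, h y hy]
    · intro h x hx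
      exact h x hx r (by simp)

lemma takeWhile_len_iff (p : String → Bool) : ∀ (t : List String) (j : Nat), j ≤ t.length →
    (j ≤ (t.takeWhile p).length ↔ ∀ x ∈ t.take j, p x = true) := by
  intro t
  induction t with
  | nil =>
    intro j hj
    simp only [List.length_nil, Nat.le_zero] at hj
    subst hj
    simp
  | cons a t ih =>
    intro j hj
    cases j with
    | zero => simp
    | succ j' =>
      cases hpa : p a with
      | true =>
        rw [show (a :: t).takeWhile p = a :: t.takeWhile p from by
              simp [hpa]]
        simp only [List.length_cons, Nat.add_le_add_iff_right, List.take_succ_cons,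
          List.mem_cons]
        rw [ih j' (by simpa using hj)]
        constructor
        · intro h x hx
          rcases hx with rfl | hx
          · exact hpa
          · exact h x hx
        · intro h x hx
          exact h x (Or.inr hx)
      | false =>
        rw [show (a :: t).takeWhile p = [] from by simp [hpa]]
        simp only [List.length_nil, List.take_succ_cons, List.mem_cons]
        constructor
        · intro h
          exact absurd h (by omega)
        · intro h
          have hh := h a (Or.inl rfl)
          rw [hpa] at hh
          exact absurd hh (by simp)

lemma trailRun_eq (stack : List String) (h : String) (t : List String)
    (hr : stack.reverse = h :: t) :
    trailRun stack = (t.takeWhile (fun c => c == h)).length + 1 := by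
  unfold trailRun
  rw [hr]
  simp

lemma trailRun_le (stack : List String) : trailRun stack ≤ stack.length := by
  cases hr : stack.reverse with
  | nil => unfold trailRun; rw [hr]; simp
  | cons h t =>
    unfold trailRun
    rw [hr]
    have h1 := (List.takeWhile_sublist (l := h :: t) (fun c => c == h)).length_le
    have h2 : (h :: t).length = stack.length := by
      rw [← hr, List.length_reverse]
    simp only [List.length_cons] at h1 h2 ⊢
    omega

-- the cascaded window test of A at width k is B's run-length threshold k
lemma pair_eq (stack : List String) (k : Nat) (hk : 1 ≤ k) :
    (sameRanksA (PySem.List.slice stack (some (-(k : Int))) none) && decide (stack.length > k - 1))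
      = decide (k ≤ trailRun stack) := by
  by_cases hle : k ≤ stack.length
  · have hgt : stack.length > k - 1 := by omega
    rw [decide_eq_true hgt, Bool.and_true]
    rw [PySem.List.slice_from_neg_natCast stack k (by omega)]
    have hdt : (stack.reverse.take k).reverse = stack.drop (stack.length - k) := by
      rw [List.reverse_take, List.reverse_reverse, List.length_reverse]
    rw [← hdt]
    cases hr : stack.reverse with
    | nil =>
      exfalso
      have := List.reverse_eq_nil_iff.mp hr
      subst this
      simp at hle
      omega
    | cons h t =>
      have hlt : stack.length = t.length + 1 := by
        rw [← List.length_reverse, hr, List.length_cons]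
      cases k with
      | zero => omega
      | succ k' =>
        rw [trailRun_eq stack h t hr, List.take_succ_cons]
        apply bool_ext
        rw [sameRanksA_iff, decide_eq_true_eq]
        have htw := takeWhile_len_iff (fun c => c == h) t k' (by omega)
        constructor
        · intro hall
          have hx0 : ∀ x ∈ t.take k', x = h := by
            intro x hx
            exact hall x (by simp [List.mem_reverse, List.mem_cons, hx])
              h (by simp [List.mem_reverse])
          have : k' ≤ (t.takeWhile (fun c => c == h)).length :=
            htw.mpr (fun x hxx => by simp [hx0 x hxx])
          omega
        · intro hrun
          have hx : ∀ x ∈ t.take k', x = h := by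
            intro x hx
            have := htw.mp (by omega) x hx
            simpa using this
          intro x hxm y hym
          rw [List.mem_reverse, List.mem_cons] at hxm hym
          have ex : x = h := by
            rcases hxm with rfl | hxm
            · rfl
            · exact hx x hxm
          have ey : y = h := by
            rcases hym with rfl | hym
            · rfl
            · exact hx y hym
          rw [ex, ey]
  · have h1 : ¬ (stack.length > k - 1) := by omega
    rw [decide_eq_false h1, Bool.and_false]
    have h2 : ¬ (k ≤ trailRun stack) := by
      have := trailRun_le stack
      omega
    rw [decide_eq_false h2]

lemma pair4 (stack : List String) :
    (sameRanksA (PySem.List.slice stack (some (-4)) none) && decide (stack.length > 3))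
      = decide (4 ≤ trailRun stack) := by
  have h := pair_eq stack 4 (by norm_num)
  norm_num at h
  exact h

lemma pair3 (stack : List String) :
    (sameRanksA (PySem.List.slice stack (some (-3)) none) && decide (stack.length > 2))
      = decide (3 ≤ trailRun stack) := by
  have h := pair_eq stack 3 (by norm_num)
  norm_num at h
  exact h

lemma pair2 (stack : List String) :
    (sameRanksA (PySem.List.slice stack (some (-2)) none) && decide (stack.length > 1))
      = decide (2 ≤ trailRun stack) := by
  have h := pair_eq stack 2 (by norm_num)
  norm_num at h
  exact h

lemma eval_eq (stack : List String) : evaluate stack = evaluate_alt stack := by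
  unfold evaluate evaluate_alt
  rw [Bool.and_comm (PySem.List.pyGet? stack 0 == some "J") (stack.length == 1)]
  rw [sum_filterMap_getD rankCount? stack]
  simp only [show (stack.length < 8) ↔ (stack.length ≤ 7) from by omega]
  rw [loops_concrete stack]
  rw [pair4 stack, pair3 stack, pair2 stack]
  simp only [decide_eq_true_eq]

-- ===== VERDICT (by name: the statement is the Claim_ definition above) =====
theorem evaluate_spec : Claim_equal_evaluate := by
  intro stack _ _
  exact eval_eq stack
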